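-- pv_equiv track=rewrite | github.com/BapanmLdL/Python-Project | Stack_Queue_Deque/queue_deque.py | first_circular_tour
-- ===== SOURCE A (Python) =====
-- def first_circular_tour(petrol, dist):
--     start = 0
--     curr_petrol = 0
--     prev_petrol = 0
--     n = len(petrol)
--     for i in range(n):
--         curr_petrol += (petrol[i] - dist[i])
--         if curr_petrol < 0:
--             start = i + 1
--             prev_petrol += curr_petrol
--             curr_petrol = 0
--
--     return start + 1 if (curr_petrol + prev_petrol) >= 0 else -1
-- ===== SOURCE B (Python) =====
-- def first_circular_tour(petrol, dist):
--     total = 0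
--     prefixes = [0]
--     for i in range(len(petrol)):
--         total += petrol[i] - dist[i]
--         prefixes.append(total)
--     start = prefixes.index(min(prefixes))
--     return start + 1 if total >= 0 else -1
-- ===== Notes on version B (the rewrite author's own statement) =====
-- stated objective: alternative
-- what changed: Replaces the greedy reset loop over three state variables (start/curr_petrol/prev_petrol) with building the prefix-sum list and returning index(min(prefixes))+1 when the total surplus is nonnegative.
import Mathlib
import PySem

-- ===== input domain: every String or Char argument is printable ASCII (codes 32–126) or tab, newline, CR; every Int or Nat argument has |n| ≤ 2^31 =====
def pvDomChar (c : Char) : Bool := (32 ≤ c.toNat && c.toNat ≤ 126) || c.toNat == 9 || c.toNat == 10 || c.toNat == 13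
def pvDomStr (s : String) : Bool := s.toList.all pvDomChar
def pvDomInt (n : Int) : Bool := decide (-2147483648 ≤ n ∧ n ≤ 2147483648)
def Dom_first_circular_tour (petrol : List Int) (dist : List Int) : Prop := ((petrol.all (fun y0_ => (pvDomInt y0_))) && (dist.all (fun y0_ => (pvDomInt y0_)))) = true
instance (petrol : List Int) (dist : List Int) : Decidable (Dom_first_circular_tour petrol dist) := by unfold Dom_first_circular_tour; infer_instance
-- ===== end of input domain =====

-- B replaces A's greedy reset loop by the prefix-sum list and index(min(prefixes))+1: an alternative formulation of the same O(n) task (return values proved equal; no mutation involved).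

-- ===== PORT A =====
def first_circular_tour (petrol : List Int) (dist : List Int) : Int :=
  let st := (PySem.List.pyRange 0 (petrol.length : Int) 1).foldl
    (fun (st : Int × Int × Int) i =>
      let curr := st.2.1 + (PySem.List.pyGetD petrol i 0 - PySem.List.pyGetD dist i 0)
      if curr < 0 then (i + 1, 0, st.2.2 + curr) else (st.1, curr, st.2.2))
    (0, 0, 0)
  if st.2.1 + st.2.2 ≥ 0 then st.1 + 1 else -1

-- ===== PORT B =====
def first_circular_tour_alt (petrol : List Int) (dist : List Int) : Int :=
  let st := (PySem.List.pyRange 0 (petrol.length : Int) 1).foldl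
    (fun (st : Int × List Int) i =>
      let total := st.1 + (PySem.List.pyGetD petrol i 0 - PySem.List.pyGetD dist i 0)
      (total, st.2 ++ [total]))
    (0, [0])
  let m := (PySem.List.min? st.2 (fun y => y)).getD 0
  let start := (((PySem.List.index? st.2 m).getD 0 : Nat) : Int)
  if st.1 ≥ 0 then start + 1 else -1

-- ===== PRECONDITION & SPEC =====
-- Pre_ : exactly the inputs where Python A returns (dist at least as long as petrol; otherwise dist[i] raises IndexError).
def Pre_first_circular_tour (petrol : List Int) (dist : List Int) : Prop := petrol.length ≤ dist.length
instance (petrol : List Int) (dist : List Int) : Decidable (Pre_first_circular_tour petrol dist) := by unfold Pre_first_circular_tour; infer_instance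
def pvWitness_first_circular_tour : List Int × List Int := ([1, 2], [2, 1])
def Spec_first_circular_tour (petrol : List Int) (dist : List Int) (out : Int) : Prop := out = first_circular_tour_alt petrol dist
instance (petrol : List Int) (dist : List Int) (out : Int) : Decidable (Spec_first_circular_tour petrol dist out) := by unfold Spec_first_circular_tour; infer_instance

-- ===== CLAIM (what is proved, stated in full; the proofs are below) =====
def Claim_equal_first_circular_tour : Prop := ∀ (petrol : List Int) (dist : List Int), Dom_first_circular_tour petrol dist → Pre_first_circular_tour petrol dist → Spec_first_circular_tour petrol dist (first_circular_tour petrol dist)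

-- ===== LEMMAS AND PROOFS =====

-- diffs list, prefix sums Pm, running minimum Mm, first argmin Sm
def pvPm (ds : List Int) (m : Nat) : Int := (ds.take m).sum

def pvMm (ds : List Int) : Nat → Int
  | 0 => 0
  | m + 1 => min (pvMm ds m) (pvPm ds (m + 1))

def pvSm (ds : List Int) : Nat → Nat
  | 0 => 0
  | m + 1 => if pvPm ds (m + 1) < pvMm ds m then m + 1 else pvSm ds m

def pvPrefTail (ds : List Int) (m : Nat) : List Int := (List.range m).map (fun k => pvPm ds (k + 1))

def pvPrefList (ds : List Int) (m : Nat) : List Int := 0 :: pvPrefTail ds m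

theorem pvPrefList_succ (ds : List Int) (m : Nat) :
    pvPrefList ds (m + 1) = pvPrefList ds m ++ [pvPm ds (m + 1)] := by
  simp [pvPrefList, pvPrefTail, List.range_succ]

theorem pvPrefList_length (ds : List Int) (m : Nat) : (pvPrefList ds m).length = m + 1 := by
  simp [pvPrefList, pvPrefTail]

theorem pvMm_mem (ds : List Int) (m : Nat) : pvMm ds m ∈ pvPrefList ds m := by
  induction m with
  | zero => simp [pvPrefList, pvPrefTail, pvMm]
  | succ m ih =>
      rw [pvPrefList_succ]
      rcases le_total (pvMm ds m) (pvPm ds (m + 1)) with h | h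
      · simp [pvMm, min_eq_left h, ih]
      · simp [pvMm, min_eq_right h]

theorem pvMm_le (ds : List Int) (m : Nat) : ∀ x ∈ pvPrefList ds m, pvMm ds m ≤ x := by
  induction m with
  | zero => simp [pvPrefList, pvPrefTail, pvMm]
  | succ m ih =>
      intro x hx
      rw [pvPrefList_succ] at hx
      rcases List.mem_append.mp hx with h | h
      · exact le_trans (min_le_left _ _) (ih x h)
      · simp only [List.mem_singleton] at h
        subst h
        exact min_le_right _ _

theorem pvIndex_prefList (ds : List Int) (m : Nat) :
    PySem.List.index? (pvPrefList ds m) (pvMm ds m) = some (pvSm ds m) := by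
  induction m with
  | zero =>
      simp [pvPrefList, pvPrefTail, pvMm, pvSm]
  | succ m ih =>
      rw [pvPrefList_succ]
      by_cases h : pvPm ds (m + 1) < pvMm ds m
      · have hmin : pvMm ds (m + 1) = pvPm ds (m + 1) := by
          simp [pvMm]; omega
        have hnotmem : pvPm ds (m + 1) ∉ pvPrefList ds m := by
          intro hmem
          have := pvMm_le ds m _ hmem
          omega
        rw [hmin, PySem.List.index?_append_singleton_self _ _ hnotmem, pvPrefList_length]
        simp [pvSm, h]
      · have hmin : pvMm ds (m + 1) = pvMm ds m := by
          simp [pvMm]; omega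
        rw [hmin, PySem.List.index?_append_of_mem _ (pvMm_mem ds m), ih]
        simp [pvSm, h]

theorem pvFoldl_min_prefTail (ds : List Int) (m : Nat) :
    (pvPrefTail ds m).foldl min 0 = pvMm ds m := by
  induction m with
  | zero => simp [pvPrefTail, pvMm]
  | succ m ih =>
      have : pvPrefTail ds (m + 1) = pvPrefTail ds m ++ [pvPm ds (m + 1)] := by
        simp [pvPrefTail, List.range_succ]
      rw [this, List.foldl_append, ih]
      simp [pvMm]

theorem pvPm_succ (ds : List Int) (m : Nat) (h : m < ds.length) :
    pvPm ds (m + 1) = pvPm ds m + ds[m] := by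
  exact List.sum_take_succ ds m h

theorem pvDs_elem (petrol dist : List Int) (m : Nat) (h1 : m < petrol.length)
    (h2 : petrol.length ≤ dist.length) :
    (List.zipWith (fun a b => a - b) petrol dist)[m]'(by simp; omega) =
      petrol[m] - dist[m]'(by omega) := by
  simp [List.getElem_zipWith]

-- A's loop invariant: state after m iterations
theorem pvFoldA (petrol dist : List Int) (h2 : petrol.length ≤ dist.length) (m : Nat)
    (hm : m ≤ petrol.length) :
    (PySem.List.pyRange 0 (m : Int) 1).foldl
      (fun (st : Int × Int × Int) i =>
        let curr := st.2.1 + (PySem.List.pyGetD petrol i 0 - PySem.List.pyGetD dist i 0)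
        if curr < 0 then (i + 1, 0, st.2.2 + curr) else (st.1, curr, st.2.2))
      (0, 0, 0)
    = (((pvSm (List.zipWith (fun a b => a - b) petrol dist) m : Nat) : Int),
        pvPm (List.zipWith (fun a b => a - b) petrol dist) m
          - pvMm (List.zipWith (fun a b => a - b) petrol dist) m,
        pvMm (List.zipWith (fun a b => a - b) petrol dist) m) := by
  set ds := List.zipWith (fun a b => a - b) petrol dist with hds
  have hdslen : ds.length = petrol.length := by simp [hds]; omega
  induction m with
  | zero => simp [PySem.List.pyRange_one_eq_nil, pvSm, pvPm, pvMm]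
  | succ m ih =>
      have hm' : m ≤ petrol.length := by omega
      have hmlt : m < petrol.length := by omega
      have hcast : ((m + 1 : Nat) : Int) = (m : Int) + 1 := by push_cast; ring
      rw [hcast, PySem.List.pyRange_one_succ_right (by positivity), List.foldl_append,
        ih hm']
      simp only [List.foldl_cons, List.foldl_nil]
      have hp : PySem.List.pyGetD petrol ((m : Nat) : Int) 0 = petrol[m] := by
        rw [PySem.List.pyGetD_natCast]; exact List.getD_eq_getElem _ _ hmlt
      have hd : PySem.List.pyGetD dist ((m : Nat) : Int) 0 = dist[m]'(by omega) := by
        rw [PySem.List.pyGetD_natCast]; exact List.getD_eq_getElem _ _ (by omega)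
      have hdm : m < ds.length := by omega
      have hsum : pvPm ds (m + 1) = pvPm ds m + (petrol[m] - dist[m]'(by omega)) := by
        rw [pvPm_succ ds m hdm, pvDs_elem petrol dist m hmlt h2]
      simp only [hp, hd]
      by_cases hneg : pvPm ds m - pvMm ds m + (petrol[m] - dist[m]'(by omega)) < 0
      · have hlt : pvPm ds (m + 1) < pvMm ds m := by omega
        have hmin : pvMm ds (m + 1) = pvPm ds (m + 1) := by simp [pvMm]; omega
        simp only [hneg, pvMm, hsum]
        refine Prod.ext ?_ (Prod.ext ?_ ?_) <;> simp [pvSm] <;> omega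
      · have hge : ¬ pvPm ds (m + 1) < pvMm ds m := by omega
        simp only [if_neg hneg]
        refine Prod.ext ?_ (Prod.ext ?_ ?_) <;> simp [pvSm, pvMm, hsum] <;> omega

-- B's loop invariant: state after m iterations
theorem pvFoldB (petrol dist : List Int) (h2 : petrol.length ≤ dist.length) (m : Nat)
    (hm : m ≤ petrol.length) :
    (PySem.List.pyRange 0 (m : Int) 1).foldl
      (fun (st : Int × List Int) i =>
        let total := st.1 + (PySem.List.pyGetD petrol i 0 - PySem.List.pyGetD dist i 0)
        (total, st.2 ++ [total]))
      (0, [0])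
    = (pvPm (List.zipWith (fun a b => a - b) petrol dist) m,
        pvPrefList (List.zipWith (fun a b => a - b) petrol dist) m) := by
  set ds := List.zipWith (fun a b => a - b) petrol dist with hds
  have hdslen : ds.length = petrol.length := by simp [hds]; omega
  induction m with
  | zero => simp [PySem.List.pyRange_one_eq_nil, pvPm, pvPrefList, pvPrefTail]
  | succ m ih =>
      have hm' : m ≤ petrol.length := by omega
      have hmlt : m < petrol.length := by omega
      have hcast : ((m + 1 : Nat) : Int) = (m : Int) + 1 := by push_cast; ring
      rw [hcast, PySem.List.pyRange_one_succ_right (by positivity), List.foldl_append,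
        ih hm']
      simp only [List.foldl_cons, List.foldl_nil]
      have hp : PySem.List.pyGetD petrol ((m : Nat) : Int) 0 = petrol[m] := by
        rw [PySem.List.pyGetD_natCast]; exact List.getD_eq_getElem _ _ hmlt
      have hd : PySem.List.pyGetD dist ((m : Nat) : Int) 0 = dist[m]'(by omega) := by
        rw [PySem.List.pyGetD_natCast]; exact List.getD_eq_getElem _ _ (by omega)
      have hdm : m < ds.length := by omega
      have hsum : pvPm ds (m + 1) = pvPm ds m + (petrol[m] - dist[m]'(by omega)) := by
        rw [pvPm_succ ds m hdm, pvDs_elem petrol dist m hmlt h2]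
      simp only [hp, hd]
      rw [pvPrefList_succ]
      exact Prod.ext (by omega) (by rw [hsum])

-- ===== VERDICT (by name: the statement is the Claim_ definition above) =====
theorem first_circular_tour_spec : Claim_equal_first_circular_tour := by
  intro petrol dist _hdom hpre
  unfold Spec_first_circular_tour first_circular_tour first_circular_tour_alt
  have h2 : petrol.length ≤ dist.length := hpre
  rw [pvFoldA petrol dist h2 petrol.length le_rfl, pvFoldB petrol dist h2 petrol.length le_rfl]
  set ds := List.zipWith (fun a b => a - b) petrol dist with hds
  have hmin : PySem.List.min? (pvPrefList ds petrol.length) (fun y => y)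
      = some (pvMm ds petrol.length) := by
    rw [pvPrefList]
    rw [PySem.List.min?_id_cons]
    rw [pvFoldl_min_prefTail]
  have hidx := pvIndex_prefList ds petrol.length
  simp only [hmin, Option.getD_some, hidx]
  have hcond : pvPm ds petrol.length - pvMm ds petrol.length + pvMm ds petrol.length
      = pvPm ds petrol.length := by ring
  rw [hcond]
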